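-- pv_equiv track=rewrite | github.com/saikrishna1605/JuryGen | backend/app/agents/jurisdiction_agent.py | _generate_conflict_recommendations
-- ===== SOURCE A (Python) =====
-- from typing import Dict, List, Optional, Tuple, Any
--
-- def _generate_conflict_recommendations(conflicts: List[Dict[str, Any]]) -> List[str]:
--     """Generate recommendations for handling jurisdiction conflicts."""
--     recommendations = []
--
--     if not conflicts:
--         recommendations.append("No significant jurisdiction conflicts identified.")
--         return recommendations
--
--     high_severity_conflicts = [c for c in conflicts if c.get("severity") == "high"]
--     if high_severity_conflicts:
--         recommendations.append("Consult with legal counsel in all applicable jurisdictions due to high-severity conflicts.")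
--
--     choice_of_law_conflicts = [c for c in conflicts if "choice of law" in c.get("type", "").lower()]
--     if choice_of_law_conflicts:
--         recommendations.append("Include explicit choice of law and forum selection clauses.")
--
--     enforcement_conflicts = [c for c in conflicts if "enforcement" in c.get("type", "").lower()]
--     if enforcement_conflicts:
--         recommendations.append("Consider alternative dispute resolution mechanisms.")
--
--     if len(conflicts) > 2:
--         recommendations.append("Consider simplifying the jurisdictional scope to reduce complexity.")
--
--     return recommendations
-- ===== SOURCE B (Python) =====
-- def _generate_conflict_recommendations(conflicts):
--     """Generate recommendations for handling jurisdiction conflicts (single-pass flags)."""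
--     if not conflicts:
--         return ["No significant jurisdiction conflicts identified."]
--     has_high = has_col = has_enf = False
--     for c in conflicts:
--         has_high = has_high or c.get("severity") == "high"
--         t = c.get("type", "").lower()
--         has_col = has_col or "choice of law" in t
--         has_enf = has_enf or "enforcement" in t
--     recommendations = []
--     if has_high:
--         recommendations.append("Consult with legal counsel in all applicable jurisdictions due to high-severity conflicts.")
--     if has_col:
--         recommendations.append("Include explicit choice of law and forum selection clauses.")
--     if has_enf:
--         recommendations.append("Consider alternative dispute resolution mechanisms.")
--     if len(conflicts) > 2:
--         recommendations.append("Consider simplifying the jurisdictional scope to reduce complexity.")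
--     return recommendations
-- ===== Notes on version B (the rewrite author's own statement) =====
-- stated objective: alternative
-- what changed: Replaces the three separate filtering passes (building intermediate conflict lists that are only tested for emptiness) with one fold over the conflicts accumulating three boolean flags, then appends the gated recommendation strings.
import Mathlib
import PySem

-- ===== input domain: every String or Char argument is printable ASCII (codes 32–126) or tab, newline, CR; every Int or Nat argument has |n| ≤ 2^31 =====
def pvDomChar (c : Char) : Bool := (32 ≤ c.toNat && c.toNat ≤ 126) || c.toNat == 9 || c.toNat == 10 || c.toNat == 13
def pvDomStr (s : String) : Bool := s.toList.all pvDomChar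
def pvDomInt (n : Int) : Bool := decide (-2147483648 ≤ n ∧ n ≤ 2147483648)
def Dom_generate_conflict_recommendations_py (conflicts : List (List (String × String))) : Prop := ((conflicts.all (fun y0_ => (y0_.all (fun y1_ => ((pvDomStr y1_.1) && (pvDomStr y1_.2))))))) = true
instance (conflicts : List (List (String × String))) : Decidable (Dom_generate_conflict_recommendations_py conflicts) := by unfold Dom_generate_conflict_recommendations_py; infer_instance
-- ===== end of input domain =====

-- B replaces A's three filtering passes by one flag-accumulating fold; same return value everywhere.

-- ===== PORT A =====
-- the three predicates tested by A's comprehensions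
def pvHighA (c : List (String × String)) : Bool :=
  (PySem.Dict.mk c).get? "severity" == some "high"
def pvColA (c : List (String × String)) : Bool :=
  PySem.Str.isIn "choice of law" (PySem.Str.lower ((PySem.Dict.mk c).getD "type" ""))
def pvEnfA (c : List (String × String)) : Bool :=
  PySem.Str.isIn "enforcement" (PySem.Str.lower ((PySem.Dict.mk c).getD "type" ""))

def generate_conflict_recommendations_py (conflicts : List (List (String × String))) : List String :=
  let recommendations : List String := []
  if conflicts = [] then
    recommendations ++ ["No significant jurisdiction conflicts identified."]
  else
    let high_severity_conflicts := conflicts.filter pvHighA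
    let recommendations := if high_severity_conflicts ≠ [] then
      recommendations ++ ["Consult with legal counsel in all applicable jurisdictions due to high-severity conflicts."] else recommendations
    let choice_of_law_conflicts := conflicts.filter pvColA
    let recommendations := if choice_of_law_conflicts ≠ [] then
      recommendations ++ ["Include explicit choice of law and forum selection clauses."] else recommendations
    let enforcement_conflicts := conflicts.filter pvEnfA
    let recommendations := if enforcement_conflicts ≠ [] then
      recommendations ++ ["Consider alternative dispute resolution mechanisms."] else recommendations
    let recommendations := if (conflicts.length : Int) > 2 then
      recommendations ++ ["Consider simplifying the jurisdictional scope to reduce complexity."] else recommendations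
    recommendations

-- ===== PORT B =====
-- one pass, three boolean flags
def pvStep (acc : Bool × Bool × Bool) (c : List (String × String)) : Bool × Bool × Bool :=
  let t := PySem.Str.lower ((PySem.Dict.mk c).getD "type" "")
  (acc.1 || ((PySem.Dict.mk c).get? "severity" == some "high"),
   acc.2.1 || PySem.Str.isIn "choice of law" t,
   acc.2.2 || PySem.Str.isIn "enforcement" t)

def generate_conflict_recommendations_py_alt (conflicts : List (List (String × String))) : List String :=
  if conflicts = [] then ["No significant jurisdiction conflicts identified."]
  else
    let flags := conflicts.foldl pvStep (false, false, false)
    (if flags.1 then ["Consult with legal counsel in all applicable jurisdictions due to high-severity conflicts."] else []) ++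
    (if flags.2.1 then ["Include explicit choice of law and forum selection clauses."] else []) ++
    (if flags.2.2 then ["Consider alternative dispute resolution mechanisms."] else []) ++
    (if (conflicts.length : Int) > 2 then ["Consider simplifying the jurisdictional scope to reduce complexity."] else [])

-- ===== PRECONDITION & SPEC =====
def Spec_generate_conflict_recommendations_py (conflicts : List (List (String × String))) (out : List String) : Prop := out = generate_conflict_recommendations_py_alt conflicts
instance (conflicts : List (List (String × String))) (out : List String) : Decidable (Spec_generate_conflict_recommendations_py conflicts out) := by unfold Spec_generate_conflict_recommendations_py; infer_instance

-- ===== CLAIM (what is proved, stated in full; the proofs are below) =====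
def Claim_equal_generate_conflict_recommendations_py : Prop := ∀ (conflicts : List (List (String × String))), Dom_generate_conflict_recommendations_py conflicts → Spec_generate_conflict_recommendations_py conflicts (generate_conflict_recommendations_py conflicts)

-- ===== LEMMAS AND PROOFS =====

theorem pvFoldStep (conflicts : List (List (String × String))) (a b c : Bool) :
    conflicts.foldl pvStep (a, b, c) =
      (a || conflicts.any pvHighA, b || conflicts.any pvColA, c || conflicts.any pvEnfA) := by
  induction conflicts generalizing a b c with
  | nil => simp
  | cons x xs ih =>
    simp only [List.foldl_cons, List.any_cons, pvStep]
    rw [ih]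
    simp [pvHighA, pvColA, pvEnfA, Bool.or_assoc]

-- ===== VERDICT (by name: the statement is the Claim_ definition above) =====
theorem generate_conflict_recommendations_py_spec : Claim_equal_generate_conflict_recommendations_py := by
  intro conflicts _
  unfold Spec_generate_conflict_recommendations_py generate_conflict_recommendations_py
    generate_conflict_recommendations_py_alt
  by_cases h : conflicts = []
  · simp [h]
  · simp only [h, pvFoldStep, Bool.false_or]
    by_cases h1 : conflicts.any pvHighA = true <;>
    by_cases h2 : conflicts.any pvColA = true <;>
    by_cases h3 : conflicts.any pvEnfA = true <;>
    by_cases h4 : (conflicts.length : Int) > 2 <;>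
      (simp only [List.any_eq_true] at h1 h2 h3; simp [h1, h2, h3, h4])
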